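-- pv_equiv track=rewrite | github.com/BaeJihyun97/CodingTest | 프로그래머스/3/258709. 주사위 고르기/주사위 고르기.py | solution
-- ===== SOURCE A (Python) =====
-- from itertools import combinations, product
--
-- def count(A, B):
--     count = 0
--     scoreAl, scoreBl = [], []
--     scoreAd, scoreBd = {}, {}
--
--     for comb in product(*A):
--         scoreAl.append(sum(comb))
--     for comb in product(*B):
--         scoreBl.append(sum(comb))
--
--     scoreAl.sort(reverse=True); scoreBl.sort(reverse=True);
--     indexA, indexB = 0, 0
--     scoreBl_len = len(scoreBl)
--     while indexA < len(scoreAl) and indexB < len(scoreBl):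
--
--         # scoreAl에 같은 숫자 세기
--         currAC = 1
--         currAV = scoreAl[indexA]
--         while indexA < len(scoreAl)-1:
--             if scoreAl[indexA+1] == currAV:
--                 currAC += 1
--                 indexA += 1
--             else: break
--
--         while indexB < len(scoreBl):
--             if currAV > scoreBl[indexB]:
--                 break
--             else:
--                 indexB += 1
--
--         count += currAC * (scoreBl_len - indexB)
--         indexA += 1
--
--     return count
--
-- def solution(dice):
--
--     n_dice = len(dice)
--     dice_index = list(range(n_dice))
--
--
--     combs = list(combinations(dice_index, n_dice // 2))
--     stats = {key:0 for key in combs}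
--     for combA in combs:
--         combB = tuple([a for a in dice_index if a not in combA])
--         stats[combA] = count([dice[i] for i in combA], [dice[i] for i in combB])
--
--     answer = max(stats, key=lambda x: stats[x])
--     answer = [i+1 for i in answer]
--     return sorted(answer)
-- ===== SOURCE B (Python) =====
-- # B: sum-frequency distributions built by dict convolution + sorted-key prefix scan,
-- # instead of enumerating all 6^(n/2) product tuples per half.
-- from itertools import combinations
--
-- def _dist(ds):
--     dist = {0: 1}
--     for die in ds:
--         new = {}
--         for v, c in dist.items():
--             for f in die:
--                 s = v + f
--                 new[s] = new.get(s, 0) + c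
--         dist = new
--     return dist
--
-- def _wins(dA, dB):
--     keysA = sorted(dA)
--     keysB = sorted(dB)
--     total = 0
--     cum = 0
--     j = 0
--     for a in keysA:
--         while j < len(keysB) and keysB[j] < a:
--             cum += dB[keysB[j]]
--             j += 1
--         total += dA[a] * cum
--     return total
--
-- def solution(dice):
--     n = len(dice)
--     idxs = list(range(n))
--     best_comb = None
--     best_wins = -1
--     for comb in combinations(idxs, n // 2):
--         dA = _dist([dice[i] for i in comb])
--         dB = _dist([dice[i] for i in idxs if i not in comb])
--         w = _wins(dA, dB)
--         if w > best_wins: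
--             best_wins = w
--             best_comb = comb
--     return sorted(i + 1 for i in best_comb)
-- ===== Notes on version B (the rewrite author's own statement) =====
-- stated objective: alternative
-- what changed: Per split, B builds sum-frequency distributions by dict convolution over the dice and counts winning pairs with a single prefix scan over the sorted distinct sums, instead of A's enumerating all 6^(n/2) product tuples of each half, sorting the two full score lists and running a grouped two-pointer scan; B also keeps the first strict maximum in one fold instead of building a stats dict and calling max over its keys.
import Mathlib
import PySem

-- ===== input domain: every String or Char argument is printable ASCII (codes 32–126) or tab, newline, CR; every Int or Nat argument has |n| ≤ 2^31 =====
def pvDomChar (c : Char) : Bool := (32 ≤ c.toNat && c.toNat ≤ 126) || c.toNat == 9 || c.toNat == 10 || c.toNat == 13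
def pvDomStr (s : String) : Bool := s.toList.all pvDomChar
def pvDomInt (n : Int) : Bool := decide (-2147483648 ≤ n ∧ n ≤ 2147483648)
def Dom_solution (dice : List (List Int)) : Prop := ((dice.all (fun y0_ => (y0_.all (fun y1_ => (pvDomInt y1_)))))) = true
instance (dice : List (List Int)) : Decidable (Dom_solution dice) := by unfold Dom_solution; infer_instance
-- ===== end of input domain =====

-- B replaces A's per-split enumeration of all 6^(n/2) product tuples by dict-convolved
-- sum-frequency distributions and a sorted-distinct-key prefix scan (objective: alternative).

-- ===== PORT A =====
-- itertools.product(*A) as a list of tuples (tuples as lists)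
def pyProduct (ls : List (List Int)) : List (List Int) :=
  match ls with
  | [] => [[]]
  | d :: ds => d.flatMap (fun f => (pyProduct ds).map (fun t => f :: t))

-- inner `while indexA < len(scoreAl)-1: …` (fuel = enough iterations; purely a totality device)
def groupScanGo (sa : List Int) (currAV : Int) : Nat → Nat → Int → Nat × Int
  | 0, iA, currAC => (iA, currAC)
  | fuel + 1, iA, currAC =>
    if iA + 1 < sa.length then
      if sa.getD (iA + 1) 0 = currAV then groupScanGo sa currAV fuel (iA + 1) (currAC + 1)
      else (iA, currAC)
    else (iA, currAC)

def groupScan (sa : List Int) (currAV : Int) (iA : Nat) (currAC : Int) : Nat × Int :=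
  groupScanGo sa currAV (sa.length + 1) iA currAC

def advBGo (sb : List Int) (currAV : Int) : Nat → Nat → Nat
  | 0, iB => iB
  | fuel + 1, iB =>
    if iB < sb.length then
      if currAV > sb.getD iB 0 then iB else advBGo sb currAV fuel (iB + 1)
    else iB

def advB (sb : List Int) (currAV : Int) (iB : Nat) : Nat :=
  advBGo sb currAV (sb.length + 1) iB

def loopAGo (sa sb : List Int) : Nat → Nat → Nat → Int → Int
  | 0, _, _, cnt => cnt
  | fuel + 1, iA, iB, cnt =>
    if iA < sa.length ∧ iB < sb.length then
      let currAV := sa.getD iA 0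
      let g := groupScan sa currAV iA 1
      let iB' := advB sb currAV iB
      loopAGo sa sb fuel (g.1 + 1) iB' (cnt + g.2 * ((sb.length : Int) - (iB' : Int)))
    else cnt

def loopA (sa sb : List Int) (iA iB : Nat) (cnt : Int) : Int :=
  loopAGo sa sb (sa.length + 1) iA iB cnt
-- `def count(A, B)` of the Python source
def countPy (A B : List (List Int)) : Int :=
  let scoreAl := (pyProduct A).map (fun comb => comb.sum)
  let scoreBl := (pyProduct B).map (fun comb => comb.sum)
  let sa := PySem.List.sorted scoreAl (fun x => x) true
  let sb := PySem.List.sorted scoreBl (fun x => x) true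
  loopA sa sb 0 0 0

def solution (dice : List (List Int)) : List Int :=
  let nDice := dice.length
  let diceIndex := PySem.List.pyRange 0 (nDice : Int) 1
  let combs := PySem.List.combinations diceIndex (nDice / 2)
  let stats0 : PySem.Dict (List Int) Int :=
    combs.foldl (fun d k => d.insert k 0) PySem.Dict.empty
  let stats := combs.foldl (fun d combA =>
      let combB := diceIndex.filter (fun a => !(combA.contains a))
      d.insert combA (countPy (combA.map (fun i => (PySem.List.pyGet? dice i).getD []))
                              (combB.map (fun i => (PySem.List.pyGet? dice i).getD [])))) stats0
  let answer := (PySem.List.max? stats.keys (fun x => stats.getD x 0)).getD []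
  PySem.List.sorted (answer.map (fun i => i + 1)) (fun x => x) false

-- ===== PORT B =====
-- `_dist`: sum-frequency distribution of a list of dice, by dict convolution
def distOf (ds : List (List Int)) : PySem.Dict Int Int :=
  ds.foldl (fun dist die =>
      dist.items.foldl (fun new p =>
          die.foldl (fun new f =>
              new.insert (p.1 + f) (new.getD (p.1 + f) 0 + p.2)) new)
        PySem.Dict.empty)
    (PySem.Dict.ofList [(0, 1)])

-- `while j < len(keysB) and keysB[j] < a: …` (fuel = totality device)
def winScanGo (keysB : List Int) (dB : PySem.Dict Int Int) (a : Int) :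
    Nat → Nat → Int → Nat × Int
  | 0, j, cum => (j, cum)
  | fuel + 1, j, cum =>
    if j < keysB.length ∧ keysB.getD j 0 < a then
      winScanGo keysB dB a fuel (j + 1) (cum + dB.getD (keysB.getD j 0) 0)
    else (j, cum)

def winScan (keysB : List Int) (dB : PySem.Dict Int Int) (a : Int) (j : Nat) (cum : Int) :
    Nat × Int :=
  winScanGo keysB dB a (keysB.length + 1) j cum

-- `_wins`
def wins (dA dB : PySem.Dict Int Int) : Int :=
  let keysA := PySem.List.sorted dA.keys (fun x => x) false
  let keysB := PySem.List.sorted dB.keys (fun x => x) false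
  let st := keysA.foldl (fun (st : Int × Int × Nat) a =>
      let p := winScan keysB dB a st.2.2 st.2.1
      (st.1 + dA.getD a 0 * p.2, p.2, p.1)) (0, 0, 0)
  st.1

def solution_alt (dice : List (List Int)) : List Int :=
  let n := dice.length
  let idxs := PySem.List.pyRange 0 (n : Int) 1
  let best := (PySem.List.combinations idxs (n / 2)).foldl
      (fun (st : Int × List Int) comb =>
        let dA := distOf (comb.map (fun i => (PySem.List.pyGet? dice i).getD []))
        let dB := distOf ((idxs.filter (fun a => !(comb.contains a))).map
            (fun i => (PySem.List.pyGet? dice i).getD []))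
        let w := wins dA dB
        if w > st.1 then (w, comb) else st)
      (-1, [])
  PySem.List.sorted (best.2.map (fun i => i + 1)) (fun x => x) false

-- ===== PRECONDITION & SPEC =====
def Spec_solution (dice : List (List Int)) (out : List Int) : Prop := out = solution_alt dice
instance (dice : List (List Int)) (out : List Int) : Decidable (Spec_solution dice out) := by
  unfold Spec_solution; infer_instance

-- ===== CLAIM (what is proved, stated in full; the proofs are below) =====
def Claim_equal_solution : Prop := ∀ (dice : List (List Int)), Dom_solution dice → Spec_solution dice (solution dice)

-- ===== LEMMAS AND PROOFS =====

-- the reference count: #{(x, y) ∈ la × lb : y < x}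
def refCnt (la lb : List Int) : Int :=
  (la.map (fun x => ((lb.countP (fun y => decide (y < x)) : Nat) : Int))).sum

-- sums of all product tuples
def sums (ds : List (List Int)) : List Int := (pyProduct ds).map List.sum

-- a dict represents the multiset of a list
def ReprD (d : PySem.Dict Int Int) (L : List Int) : Prop :=
  d.keys.Nodup ∧ (∀ v, v ∈ d.keys ↔ v ∈ L) ∧ (∀ v, d.getD v 0 = (L.count v : Int))

lemma refCnt_nonneg (la lb : List Int) : 0 ≤ refCnt la lb := by
  apply List.sum_nonneg
  intro x hx
  simp only [List.mem_map] at hx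
  obtain ⟨y, _, rfl⟩ := hx
  positivity

lemma groupScanGo_spec (sa : List Int) (v : Int) :
    ∀ (fuel iA : Nat) (c : Int), sa.length ≤ iA + fuel + 1 →
    iA ≤ (groupScanGo sa v fuel iA c).1 ∧
    ((groupScanGo sa v fuel iA c).1 < sa.length ∨ sa.length ≤ iA) ∧
    (groupScanGo sa v fuel iA c).2 = c + (((groupScanGo sa v fuel iA c).1 - iA : Nat) : Int) ∧
    (∀ k, iA < k → k ≤ (groupScanGo sa v fuel iA c).1 → sa.getD k 0 = v) ∧
    (sa.length ≤ (groupScanGo sa v fuel iA c).1 + 1 ∨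
      sa.getD ((groupScanGo sa v fuel iA c).1 + 1) 0 ≠ v) := by
  intro fuel
  induction fuel with
  | zero =>
    intro iA c hf
    simp only [groupScanGo]
    exact ⟨le_refl _, by omega, by simp, by omega, by omega⟩
  | succ fuel IH =>
    intro iA c hf
    simp only [groupScanGo]
    by_cases h1 : iA + 1 < sa.length
    · rw [if_pos h1]
      by_cases h2 : sa.getD (iA + 1) 0 = v
      · rw [if_pos h2]
        obtain ⟨i1, i2, i3, i4, i5⟩ := IH (iA + 1) (c + 1) (by omega)
        refine ⟨by omega, by omega, by omega, ?_, i5⟩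
        intro k hk1 hk2
        rcases Nat.lt_or_ge (iA + 1) k with hk | hk
        · exact i4 k (by omega) hk2
        · have : k = iA + 1 := by omega
          subst this; exact h2
      · rw [if_neg h2]
        exact ⟨le_refl _, by omega, by simp, by omega, Or.inr h2⟩
    · rw [if_neg h1]
      exact ⟨le_refl _, by omega, by simp, by omega, by omega⟩

lemma groupScan_spec (sa : List Int) (v : Int) (iA : Nat) (c : Int) :
    iA ≤ (groupScan sa v iA c).1 ∧
    ((groupScan sa v iA c).1 < sa.length ∨ sa.length ≤ iA) ∧
    (groupScan sa v iA c).2 = c + (((groupScan sa v iA c).1 - iA : Nat) : Int) ∧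
    (∀ k, iA < k → k ≤ (groupScan sa v iA c).1 → sa.getD k 0 = v) ∧
    (sa.length ≤ (groupScan sa v iA c).1 + 1 ∨ sa.getD ((groupScan sa v iA c).1 + 1) 0 ≠ v) :=
  groupScanGo_spec sa v (sa.length + 1) iA c (by omega)
lemma advBGo_spec (sb : List Int) (v : Int) :
    ∀ (fuel iB : Nat), iB ≤ sb.length → sb.length ≤ iB + fuel →
    iB ≤ advBGo sb v fuel iB ∧ advBGo sb v fuel iB ≤ sb.length ∧
    (∀ k, iB ≤ k → k < advBGo sb v fuel iB → ¬ (sb.getD k 0 < v)) ∧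
    (advBGo sb v fuel iB = sb.length ∨ sb.getD (advBGo sb v fuel iB) 0 < v) := by
  intro fuel
  induction fuel with
  | zero =>
    intro iB h hf
    simp only [advBGo]
    exact ⟨le_refl _, h, by omega, by omega⟩
  | succ fuel IH =>
    intro iB h hf
    simp only [advBGo]
    by_cases h1 : iB < sb.length
    · rw [if_pos h1]
      by_cases h2 : v > sb.getD iB 0
      · rw [if_pos h2]
        exact ⟨le_refl _, by omega, by omega, Or.inr h2⟩
      · rw [if_neg h2]
        obtain ⟨i1, i2, i3, i4⟩ := IH (iB + 1) (by omega) (by omega)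
        refine ⟨by omega, i2, ?_, i4⟩
        intro k hk1 hk2
        rcases Nat.lt_or_ge k (iB + 1) with hk | hk
        · have : k = iB := by omega
          subst this; simpa using h2
        · exact i3 k hk hk2
    · rw [if_neg h1]
      exact ⟨le_refl _, by omega, by omega, by omega⟩

lemma advB_spec (sb : List Int) (v : Int) (iB : Nat) (h : iB ≤ sb.length) :
    iB ≤ advB sb v iB ∧ advB sb v iB ≤ sb.length ∧
    (∀ k, iB ≤ k → k < advB sb v iB → ¬ (sb.getD k 0 < v)) ∧
    (advB sb v iB = sb.length ∨ sb.getD (advB sb v iB) 0 < v) :=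
  advBGo_spec sb v (sb.length + 1) iB h (by omega)
lemma refCnt_append (l1 l2 lb : List Int) :
    refCnt (l1 ++ l2) lb = refCnt l1 lb + refCnt l2 lb := by
  simp [refCnt]

lemma loopAGo_spec (sa sb : List Int)
    (hsa : sa.Pairwise (fun a b => b ≤ a)) (hsb : sb.Pairwise (fun a b => b ≤ a)) :
    ∀ (fuel iA iB : Nat) (cnt : Int), sa.length ≤ iA + fuel →
    iB ≤ sb.length →
    (∀ k, k < iB → ∀ i, iA ≤ i → i < sa.length → sa.getD i 0 ≤ sb.getD k 0) →
    loopAGo sa sb fuel iA iB cnt = cnt + refCnt (sa.drop iA) sb := by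
  intro fuel
  induction fuel with
  | zero =>
    intro iA iB cnt hf hiB hpre
    simp only [loopAGo]
    have : sa.drop iA = [] := List.drop_eq_nil_iff.mpr (by omega)
    rw [this]; simp [refCnt]
  | succ fuel IH =>
    intro iA iB cnt hf hiB hpre
    simp only [loopAGo]
    by_cases hc : iA < sa.length ∧ iB < sb.length
    · rw [if_pos hc]
      obtain ⟨hA, hB⟩ := hc
      set V := sa.getD iA 0 with hV
      obtain ⟨g1, g2, g3, g4, g5⟩ := groupScan_spec sa V iA 1
      obtain ⟨a1, a2, a3, a4⟩ := advB_spec sb V iB (by omega)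
      set gi := (groupScan sa V iA 1).1
      set gc := (groupScan sa V iA 1).2
      set iB' := advB sb V iB
      have hgi : gi < sa.length := by omega
      have hgroup : ∀ i, iA ≤ i → i ≤ gi → sa.getD i 0 = V := by
        intro i h1 h2
        rcases Nat.eq_or_lt_of_le h1 with rfl | h
        · rfl
        · exact g4 i h h2
      have hscanned : ∀ k, k < iB' → V ≤ sb.getD k 0 := by
        intro k hk
        rcases Nat.lt_or_ge k iB with h | h
        · exact hpre k h iA le_rfl hA
        · have := a3 k h hk; omega
      have hcnt : sb.countP (fun y => decide (y < V)) = sb.length - iB' := by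
        have hsplit : sb = sb.take iB' ++ sb.drop iB' := (List.take_append_drop _ _).symm
        nth_rewrite 1 [hsplit]
        rw [List.countP_append]
        rw [List.countP_eq_zero.mpr, List.countP_eq_length.mpr]
        · simp [List.length_drop]
        · intro y hy
          rw [List.mem_iff_getElem] at hy
          obtain ⟨k, hk, rfl⟩ := hy
          have hlen : iB' + k < sb.length := by
            have := List.length_drop (l := sb) (i := iB'); omega
          rcases a4 with h4 | h4
          · omega
          · have hle : (sb.drop iB')[k] ≤ sb.getD iB' 0 := by
              rw [List.getElem_drop, List.getD_eq_getElem sb 0 (by omega)]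
              rcases Nat.eq_or_lt_of_le (Nat.zero_le k) with hk0 | hkpos
              · simp [← hk0]
              · exact (List.pairwise_iff_getElem.mp hsb) iB' (iB' + k) (by omega) hlen (by omega)
            simp only [decide_eq_true_eq]
            omega
        · intro y hy
          rw [List.mem_iff_getElem] at hy
          obtain ⟨k, hk, rfl⟩ := hy
          have hk2 : k < iB' ∧ k < sb.length := by simpa [List.length_take] using hk
          have hgt : (sb.take iB')[k]'hk = sb[k]'hk2.2 := List.getElem_take
          have := hscanned k hk2.1
          rw [List.getD_eq_getElem sb 0 hk2.2] at this
          simp only [hgt, decide_eq_true_eq]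
          omega
      have hcastB : ((sb.length - iB' : Nat) : Int) = (sb.length : Int) - (iB' : Int) := by omega
      have hsplitA : sa.drop iA = (sa.drop iA).take (gi + 1 - iA) ++ sa.drop (gi + 1) := by
        conv_lhs => rw [← List.take_append_drop (gi + 1 - iA) (sa.drop iA)]
        rw [List.drop_drop]
        have : iA + (gi + 1 - iA) = gi + 1 := by omega
        rw [this]
      have htake : refCnt ((sa.drop iA).take (gi + 1 - iA)) sb
          = ((gi + 1 - iA : Nat) : Int) * ((sb.length : Int) - (iB' : Int)) := by
        unfold refCnt
        rw [List.map_congr_left (g := fun _ => ((sb.length - iB' : Nat) : Int)) ?_]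
        · rw [PySem.List.sum_map_const_int, List.length_take, List.length_drop, hcastB]
          have : min (gi + 1 - iA) (sa.length - iA) = gi + 1 - iA := by omega
          rw [this]
        · intro x hx
          rw [List.mem_iff_getElem] at hx
          obtain ⟨k, hk, rfl⟩ := hx
          have hk2 : k < gi + 1 - iA ∧ iA + k < sa.length := by
            simp [List.length_take, List.length_drop] at hk; omega
          have hgt : ((sa.drop iA).take (gi + 1 - iA))[k]'hk
              = sa[iA + k]'hk2.2 := by
            rw [List.getElem_take, List.getElem_drop]
          have hvk : sa[iA + k]'hk2.2 = V := by
            rw [← List.getD_eq_getElem sa 0 hk2.2]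
            exact hgroup (iA + k) (by omega) (by omega)
          rw [hgt, hvk, hcnt]
      have hpre' : ∀ k, k < iB' → ∀ i, gi + 1 ≤ i → i < sa.length → sa.getD i 0 ≤ sb.getD k 0 := by
        intro k hk i hi1 hi2
        have h1 : sa.getD i 0 ≤ V := by
          rw [List.getD_eq_getElem sa 0 hi2, hV, List.getD_eq_getElem sa 0 hA]
          exact (List.pairwise_iff_getElem.mp hsa) iA i hA hi2 (by omega)
        exact le_trans h1 (hscanned k hk)
      rw [IH (gi + 1) iB' _ (by omega) a2 hpre']
      rw [hsplitA, refCnt_append, htake]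
      have hgc : gc = ((gi + 1 - iA : Nat) : Int) := by omega
      rw [hgc]; ring
    · rw [if_neg hc]
      rcases Nat.lt_or_ge iA sa.length with h | h
      · have hiBeq : iB = sb.length := by omega
        have : refCnt (sa.drop iA) sb = 0 := by
          unfold refCnt
          rw [List.map_congr_left (g := fun _ => (0 : Int)) ?_]
          · simp
          · intro x hx
            have : sb.countP (fun y => decide (y < x)) = 0 := by
              rw [List.countP_eq_zero]
              intro y hy
              rw [List.mem_iff_getElem] at hy
              obtain ⟨k, hk, rfl⟩ := hy
              rw [List.mem_iff_getElem] at hx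
              obtain ⟨j, hj, rfl⟩ := hx
              have hj2 : iA + j < sa.length := by
                have := List.length_drop (l := sa) (i := iA); omega
              have := hpre k (by omega) (iA + j) (by omega) hj2
              rw [List.getD_eq_getElem sa 0 hj2, List.getD_eq_getElem sb 0 hk] at this
              simp only [List.getElem_drop, decide_eq_true_eq]
              omega
            rw [this]; simp
        rw [this]; ring
      · have : sa.drop iA = [] := List.drop_eq_nil_iff.mpr h
        rw [this]; simp [refCnt]

lemma loopA_spec (sa sb : List Int) (iA iB : Nat) (cnt : Int)
    (hsa : sa.Pairwise (fun a b => b ≤ a)) (hsb : sb.Pairwise (fun a b => b ≤ a))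
    (hiB : iB ≤ sb.length)
    (hpre : ∀ k, k < iB → ∀ i, iA ≤ i → i < sa.length → sa.getD i 0 ≤ sb.getD k 0) :
    loopA sa sb iA iB cnt = cnt + refCnt (sa.drop iA) sb :=
  loopAGo_spec sa sb hsa hsb (sa.length + 1) iA iB cnt (by omega) hiB hpre
lemma winScanGo_spec (keysB : List Int) (dB : PySem.Dict Int Int) (a : Int) :
    ∀ (fuel j : Nat) (cum : Int), j ≤ keysB.length → keysB.length ≤ j + fuel →
    j ≤ (winScanGo keysB dB a fuel j cum).1 ∧
    (winScanGo keysB dB a fuel j cum).1 ≤ keysB.length ∧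
    (winScanGo keysB dB a fuel j cum).2 = cum +
      (((keysB.drop j).take ((winScanGo keysB dB a fuel j cum).1 - j)).map
        (fun b => dB.getD b 0)).sum ∧
    (∀ k, j ≤ k → k < (winScanGo keysB dB a fuel j cum).1 → keysB.getD k 0 < a) ∧
    ((winScanGo keysB dB a fuel j cum).1 = keysB.length ∨
      ¬ keysB.getD (winScanGo keysB dB a fuel j cum).1 0 < a) := by
  intro fuel
  induction fuel with
  | zero =>
    intro j cum h hf
    simp only [winScanGo]
    exact ⟨le_refl _, h, by simp, by omega, by omega⟩
  | succ fuel IH =>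
    intro j cum h hf
    simp only [winScanGo]
    by_cases h1 : j < keysB.length ∧ keysB.getD j 0 < a
    · rw [if_pos h1]
      obtain ⟨i1, i2, i3, i4, i5⟩ := IH (j + 1) (cum + dB.getD (keysB.getD j 0) 0)
        (by omega) (by omega)
      refine ⟨by omega, i2, ?_, ?_, i5⟩
      · rw [i3]
        rw [List.drop_eq_getElem_cons (show j < keysB.length by omega)]
        have hstep : (winScanGo keysB dB a fuel (j + 1) (cum + dB.getD (keysB.getD j 0) 0)).1 - j
            = ((winScanGo keysB dB a fuel (j + 1) (cum + dB.getD (keysB.getD j 0) 0)).1 - (j + 1)) + 1 := by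
          omega
        rw [hstep, List.take_succ_cons, List.map_cons, List.sum_cons,
          List.getD_eq_getElem keysB 0 (show j < keysB.length by omega)]
        ring
      · intro k hk1 hk2
        rcases Nat.eq_or_lt_of_le hk1 with rfl | hgt
        · exact h1.2
        · exact i4 k hgt hk2
    · rw [if_neg h1]
      rw [not_and_or] at h1
      refine ⟨le_refl _, h, by simp, by omega, ?_⟩
      rcases h1 with h1 | h1
      · left; omega
      · right; exact h1

lemma winScan_spec (keysB : List Int) (dB : PySem.Dict Int Int) (a : Int) (j : Nat) (cum : Int)
    (h : j ≤ keysB.length) :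
    j ≤ (winScan keysB dB a j cum).1 ∧ (winScan keysB dB a j cum).1 ≤ keysB.length ∧
    (winScan keysB dB a j cum).2 = cum +
      (((keysB.drop j).take ((winScan keysB dB a j cum).1 - j)).map
        (fun b => dB.getD b 0)).sum ∧
    (∀ k, j ≤ k → k < (winScan keysB dB a j cum).1 → keysB.getD k 0 < a) ∧
    ((winScan keysB dB a j cum).1 = keysB.length ∨
      ¬ keysB.getD (winScan keysB dB a j cum).1 0 < a) :=
  winScanGo_spec keysB dB a (keysB.length + 1) j cum h (by omega)
lemma filter_eq_take (l : List Int) (p : Int → Bool) (j : Nat) (hj : j ≤ l.length)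
    (h1 : ∀ k (hk : k < l.length), k < j → p l[k] = true)
    (h2 : ∀ k (hk : k < l.length), j ≤ k → p l[k] = false) :
    l.filter p = l.take j := by
  conv_lhs => rw [← List.take_append_drop j l]
  rw [List.filter_append, List.filter_eq_self.mpr, List.filter_eq_nil_iff.mpr, List.append_nil]
  · intro y hy
    rw [List.mem_iff_getElem] at hy
    obtain ⟨k, hk, rfl⟩ := hy
    have hk2 : j + k < l.length := by
      have := List.length_drop (l := l) (i := j); omega
    rw [List.getElem_drop]
    simp [h2 (j + k) hk2 (by omega)]
  · intro y hy
    rw [List.mem_iff_getElem] at hy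
    obtain ⟨k, hk, rfl⟩ := hy
    have hk2 : k < j ∧ k < l.length := by simpa [List.length_take] using hk
    rw [List.getElem_take]
    exact h1 k hk2.2 hk2.1

lemma winFold_spec (keysB : List Int) (dA dB : PySem.Dict Int Int) (rest : List Int)
    (t cum : Int) (j : Nat)
    (hB : ∀ p q (hp : p < keysB.length) (hq : q < keysB.length), p < q → keysB[p] < keysB[q])
    (hrest : rest.Pairwise (· ≤ ·))
    (hj : j ≤ keysB.length)
    (hcum : cum = ((keysB.take j).map (fun b => dB.getD b 0)).sum)
    (hpast : ∀ k, k < j → ∀ a ∈ rest, keysB.getD k 0 < a) :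
    (rest.foldl (fun (st : Int × Int × Nat) a =>
        let p := winScan keysB dB a st.2.2 st.2.1
        (st.1 + dA.getD a 0 * p.2, p.2, p.1)) (t, cum, j)).1
      = t + (rest.map (fun a => dA.getD a 0 *
          ((keysB.filter (fun b => decide (b < a))).map (fun b => dB.getD b 0)).sum)).sum := by
  induction rest generalizing t cum j with
  | nil => simp
  | cons a rest IH =>
    rw [List.foldl_cons]
    obtain ⟨i1, i2, i3, i4, i5⟩ := winScan_spec keysB dB a j cum hj
    set j' := (winScan keysB dB a j cum).1
    set cum' := (winScan keysB dB a j cum).2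
    have hcum' : cum' = ((keysB.take j').map (fun b => dB.getD b 0)).sum := by
      rw [i3, hcum]
      have : j' = j + (j' - j) := by omega
      rw [this, List.take_add, List.map_append, List.sum_append]
      simp
    have hlt : ∀ k (hk : k < keysB.length), k < j' → keysB[k] < a := by
      intro k hk hkj
      rcases Nat.lt_or_ge k j with hkk | hkk
      · have := hpast k hkk a (by simp)
        rwa [List.getD_eq_getElem keysB 0 hk] at this
      · have := i4 k hkk hkj
        rwa [List.getD_eq_getElem keysB 0 hk] at this
    have hge : ∀ k (hk : k < keysB.length), j' ≤ k → ¬ keysB[k] < a := by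
      intro k hk hkj
      rcases i5 with h5 | h5
      · omega
      · have hj' : j' < keysB.length := by omega
        rw [List.getD_eq_getElem keysB 0 hj'] at h5
        rcases Nat.eq_or_lt_of_le hkj with rfl | hgt
        · exact h5
        · have := hB j' k hj' hk hgt
          omega
    have hfilter : keysB.filter (fun b => decide (b < a)) = keysB.take j' := by
      apply filter_eq_take _ _ _ i2
      · intro k hk hkj; simp [hlt k hk hkj]
      · intro k hk hkj; simp [hge k hk hkj]
    have IHres := IH (t + dA.getD a 0 * cum') cum' j'
      (List.Pairwise.sublist (List.sublist_cons_self a rest) hrest) i2 hcum'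
      (by
        intro k hk a' ha'
        have hkB : k < keysB.length := by omega
        calc keysB.getD k 0 = keysB[k] := List.getD_eq_getElem keysB 0 hkB
        _ < a := hlt k hkB hk
        _ ≤ a' := (List.pairwise_cons.mp hrest).1 a' ha')
    rw [IHres, List.map_cons, List.sum_cons, hfilter, ← hcum']
    ring

lemma sum_map_split (L : List Int) (v : Int) (h : Int → Int) :
    (L.map h).sum = (L.count v : Int) * h v + ((L.filter (fun x => !(x == v))).map h).sum := by
  induction L with
  | nil => simp
  | cons x t IH =>
    by_cases hx : x = v
    · subst hx
      simp only [List.map_cons, List.sum_cons, List.count_cons_self, List.filter_cons,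
        BEq.rfl, Bool.not_true, IH]
      push_cast; ring
    · simp only [List.map_cons, List.sum_cons, List.count_cons_of_ne (by exact hx),
        List.filter_cons]
      rw [if_pos (by simp [hx]), List.map_cons, List.sum_cons, IH]
      ring

lemma group_sum (keys L : List Int) (h : Int → Int) (hnd : keys.Nodup)
    (hmem : ∀ v, v ∈ keys ↔ v ∈ L) :
    (L.map h).sum = (keys.map (fun v => (L.count v : Int) * h v)).sum := by
  induction keys generalizing L with
  | nil =>
    have : L = [] := List.eq_nil_iff_forall_not_mem.mpr (fun v hv => by
      have := (hmem v).2 hv; simp at this)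
    subst this; simp
  | cons v ks IH =>
    have hvks : v ∉ ks := (List.nodup_cons.mp hnd).1
    have hnd' : ks.Nodup := (List.nodup_cons.mp hnd).2
    set L' := L.filter (fun x => !(x == v)) with hL'
    have hmem' : ∀ w, w ∈ ks ↔ w ∈ L' := by
      intro w
      constructor
      · intro hw
        have hwv : w ≠ v := fun e => hvks (e ▸ hw)
        rw [hL', List.mem_filter]
        exact ⟨(hmem w).1 (by simp [hw]), by simp [hwv]⟩
      · intro hw
        rw [hL', List.mem_filter] at hw
        have : w ∈ v :: ks := (hmem w).2 hw.1
        rcases List.mem_cons.mp this with rfl | h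
        · simp at hw
        · exact h
    rw [sum_map_split L v h, IH L' hnd' hmem', List.map_cons, List.sum_cons]
    congr 1
    apply congrArg
    apply List.map_congr_left
    intro w hw
    have hwv : w ≠ v := fun e => hvks (e ▸ hw)
    rw [hL', List.count_filter (by simp [hwv])]

lemma sum_mul_ite (keys : List Int) (c : Int → Int) (p : Int → Bool) :
    (keys.map (fun v => c v * if p v then 1 else 0)).sum = ((keys.filter p).map c).sum := by
  induction keys with
  | nil => simp
  | cons v ks IH =>
    rw [List.map_cons, List.sum_cons, List.filter_cons]
    by_cases hp : p v
    · rw [if_pos hp, if_pos hp, List.map_cons, List.sum_cons, IH]; ring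
    · rw [if_neg hp, if_neg hp, IH]; ring

lemma group_countP (keys L : List Int) (a : Int) (hnd : keys.Nodup)
    (hmem : ∀ v, v ∈ keys ↔ v ∈ L) :
    ((L.countP (fun y => decide (y < a)) : Nat) : Int)
      = ((keys.filter (fun b => decide (b < a))).map (fun v => (L.count v : Int))).sum := by
  rw [← PySem.List.sum_map_ite_one_zero (fun y => decide (y < a)) L]
  rw [group_sum keys L _ hnd hmem]
  rw [← sum_mul_ite keys (fun v => (L.count v : Int)) (fun b => decide (b < a))]

lemma dieFold_getD (die : List Int) (v c : Int) (new : PySem.Dict Int Int) (s : Int) :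
    ((die.foldl (fun new f => new.insert (v + f) (new.getD (v + f) 0 + c)) new).getD s 0)
      = new.getD s 0 + c * ((die.countP (fun f => decide (v + f = s)) : Nat) : Int) := by
  induction die generalizing new with
  | nil => simp
  | cons f t IH =>
    rw [List.foldl_cons, IH, List.countP_cons]
    rw [PySem.Dict.getD_insert]
    by_cases hs : s = v + f
    · rw [if_pos hs, hs]
      simp only [decide_true, if_pos trivial]
      push_cast; ring
    · rw [if_neg hs]
      have : decide (v + f = s) = false := by
        simp only [decide_eq_false_iff_not]
        exact fun e => hs (Eq.symm e)
      rw [this]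
      simp

lemma itemsFold_getD (ps : List (Int × Int)) (die : List Int)
    (new0 : PySem.Dict Int Int) (s : Int) :
    ((ps.foldl (fun new p => die.foldl (fun new f =>
        new.insert (p.1 + f) (new.getD (p.1 + f) 0 + p.2)) new) new0).getD s 0)
      = new0.getD s 0 + (ps.map (fun p =>
          p.2 * ((die.countP (fun f => decide (p.1 + f = s)) : Nat) : Int))).sum := by
  induction ps generalizing new0 with
  | nil => simp
  | cons p t IH =>
    rw [List.foldl_cons, IH, dieFold_getD, List.map_cons, List.sum_cons]
    ring

lemma itemsFold_keys_mem (ps : List (Int × Int)) (die : List Int)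
    (new0 : PySem.Dict Int Int) (x : Int) :
    x ∈ (ps.foldl (fun new p => die.foldl (fun new f =>
        new.insert (p.1 + f) (new.getD (p.1 + f) 0 + p.2)) new) new0).keys
      ↔ x ∈ new0.keys ∨ ∃ p ∈ ps, ∃ f ∈ die, x = p.1 + f := by
  induction ps generalizing new0 with
  | nil => simp
  | cons p t IH =>
    rw [List.foldl_cons, IH]
    rw [PySem.Dict.keys_foldl_insert_key die (fun f => p.1 + f) _ new0]
    rw [PySem.Set.mem_update]
    simp only [List.mem_map, List.mem_cons]
    constructor
    · rintro ((h | ⟨f, hf, rfl⟩) | ⟨q, hq, f, hf, rfl⟩)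
      · exact Or.inl h
      · exact Or.inr ⟨p, Or.inl rfl, f, hf, rfl⟩
      · exact Or.inr ⟨q, Or.inr hq, f, hf, rfl⟩
    · rintro (h | ⟨q, (rfl | hq), f, hf, rfl⟩)
      · exact Or.inl (Or.inl h)
      · exact Or.inl (Or.inr ⟨f, hf, rfl⟩)
      · exact Or.inr ⟨q, hq, f, hf, rfl⟩

lemma itemsFold_keys_nodup (ps : List (Int × Int)) (die : List Int)
    (new0 : PySem.Dict Int Int) (h : new0.keys.Nodup) :
    (ps.foldl (fun new p => die.foldl (fun new f =>
        new.insert (p.1 + f) (new.getD (p.1 + f) 0 + p.2)) new) new0).keys.Nodup := by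
  induction ps generalizing new0 with
  | nil => exact h
  | cons p t IH =>
    rw [List.foldl_cons]
    exact IH _ (PySem.Dict.nodup_keys_foldl_insert_key die (fun f => p.1 + f) _ new0 h)

lemma count_map_add (x u : Int) (die : List Int) :
    (die.map (fun f => u + f)).count x = die.countP (fun f => decide (u + f = x)) := by
  rw [List.count_eq_countP, List.countP_map]
  apply List.countP_congr
  intro f _
  simp [Function.comp]

lemma convStep_repr (dist : PySem.Dict Int Int) (L : List Int) (die : List Int)
    (h : ReprD dist L) :
    ReprD (dist.items.foldl (fun new p => die.foldl (fun new f =>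
        new.insert (p.1 + f) (new.getD (p.1 + f) 0 + p.2)) new) PySem.Dict.empty)
      (L.flatMap (fun u => die.map (fun f => u + f))) := by
  obtain ⟨hnd, hmem, hcnt⟩ := h
  have hkeys : dist.keys = dist.items.map (·.1) := rfl
  refine ⟨?_, ?_, ?_⟩
  · exact itemsFold_keys_nodup _ _ _ (by simp [PySem.Dict.keys_empty])
  · intro x
    rw [itemsFold_keys_mem, PySem.Dict.keys_empty]
    simp only [List.not_mem_nil, false_or, List.mem_flatMap, List.mem_map]
    constructor
    · rintro ⟨p, hp, f, hf, rfl⟩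
      have : p.1 ∈ L := (hmem p.1).1 (PySem.Dict.mem_keys_of_mem_items dist hp)
      exact ⟨p.1, this, f, hf, rfl⟩
    · rintro ⟨u, hu, f, hf, rfl⟩
      have hu' : u ∈ dist.keys := (hmem u).2 hu
      rw [hkeys, List.mem_map] at hu'
      obtain ⟨p, hp, rfl⟩ := hu'
      exact ⟨p, hp, f, hf, rfl⟩
  · intro x
    rw [itemsFold_getD, PySem.Dict.getD_empty, zero_add]
    have hcountL : ((L.flatMap (fun u => die.map (fun f => u + f))).count x : Int)
        = (L.map (fun u => ((die.countP (fun f => decide (u + f = x)) : Nat) : Int))).sum := by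
      rw [List.count_flatMap]
      push_cast
      rw [List.map_map]
      congr 1
      apply List.map_congr_left
      intro u _
      simp only [Function.comp]
      rw [count_map_add]
    rw [hcountL, group_sum dist.keys L _ hnd hmem, hkeys, List.map_map]
    apply congrArg
    apply List.map_congr_left
    intro p hp
    have hgd : dist.getD p.1 0 = p.2 :=
      PySem.Dict.getD_of_mem_items dist (by simpa using hp) hnd 0
    rw [Function.comp]
    rw [← hcnt p.1, hgd]

def prodL (L : List Int) (ds : List (List Int)) : List Int :=
  ds.foldl (fun acc d => acc.flatMap (fun u => d.map (fun f => u + f))) L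

lemma flatMap_congr_left {A B : Type} (l : List A) (f g : A → List B)
    (h : ∀ x ∈ l, f x = g x) : l.flatMap f = l.flatMap g := by
  induction l with
  | nil => simp
  | cons x t IH =>
    rw [List.flatMap_cons, List.flatMap_cons, h x (by simp), IH (fun y hy => h y (by simp [hy]))]

lemma sums_cons (d : List Int) (ds : List (List Int)) :
    sums (d :: ds) = d.flatMap (fun f => (sums ds).map (fun s => f + s)) := by
  unfold sums
  rw [show pyProduct (d :: ds) = d.flatMap (fun f => (pyProduct ds).map (fun t => f :: t)) from rfl]
  rw [List.map_flatMap]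
  apply flatMap_congr_left
  intro f _
  rw [List.map_map, List.map_map]
  apply List.map_congr_left
  intro t _
  simp

lemma prodL_acc (ds : List (List Int)) (L : List Int) :
    prodL L ds = L.flatMap (fun u => (sums ds).map (fun s => u + s)) := by
  induction ds generalizing L with
  | nil =>
    unfold prodL sums pyProduct
    simp
  | cons d ds IH =>
    show prodL (L.flatMap (fun u => d.map (fun f => u + f))) ds = _
    rw [IH, List.flatMap_assoc, sums_cons]
    apply flatMap_congr_left
    intro u _
    rw [List.flatMap_map, List.map_flatMap]
    apply flatMap_congr_left
    intro f _
    rw [List.map_map]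
    apply List.map_congr_left
    intro s _
    simp [add_assoc]

lemma prodL_zero (ds : List (List Int)) : prodL [0] ds = sums ds := by
  rw [prodL_acc]
  simp

lemma ofList_single : PySem.Dict.ofList [((0 : Int), (1 : Int))]
    = PySem.Dict.empty.insert 0 1 := by decide

lemma repr_init : ReprD (PySem.Dict.ofList [(0, 1)]) [0] := by
  rw [ofList_single]
  refine ⟨?_, ?_, ?_⟩
  · decide
  · intro v
    rw [PySem.Dict.mem_keys_insert, PySem.Dict.keys_empty]
    simp
  · intro v
    rw [PySem.Dict.getD_insert, List.count_singleton]
    by_cases hv : v = 0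
    · subst hv; simp
    · rw [if_neg hv, PySem.Dict.getD_empty]
      simp only [beq_iff_eq]
      rw [if_neg (fun e => hv (Eq.symm e))]
      simp

lemma distOf_repr (ds : List (List Int)) : ReprD (distOf ds) (sums ds) := by
  have main : ∀ (l : List (List Int)) (dist : PySem.Dict Int Int) (L : List Int),
      ReprD dist L →
      ReprD (l.foldl (fun dist die =>
          dist.items.foldl (fun new p => die.foldl (fun new f =>
              new.insert (p.1 + f) (new.getD (p.1 + f) 0 + p.2)) new)
            PySem.Dict.empty) dist) (prodL L l) := by
    intro l
    induction l with
    | nil => intro dist L h; exact h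
    | cons d l IH =>
      intro dist L h
      rw [List.foldl_cons]
      exact IH _ _ (convStep_repr dist L d h)
  have := main ds (PySem.Dict.ofList [(0, 1)]) [0] repr_init
  rw [prodL_zero] at this
  exact this

lemma refCnt_perm (la la' lb lb' : List Int) (h1 : la.Perm la') (h2 : lb.Perm lb') :
    refCnt la lb = refCnt la' lb' := by
  unfold refCnt
  have hf : ∀ x : Int, ((lb.countP (fun y => decide (y < x)) : Nat) : Int)
      = ((lb'.countP (fun y => decide (y < x)) : Nat) : Int) := by
    intro x
    rw [h2.countP_eq]
  calc (la.map (fun x => ((lb.countP (fun y => decide (y < x)) : Nat) : Int))).sum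
      = (la.map (fun x => ((lb'.countP (fun y => decide (y < x)) : Nat) : Int))).sum := by
        rw [List.map_congr_left (fun x _ => hf x)]
    _ = (la'.map (fun x => ((lb'.countP (fun y => decide (y < x)) : Nat) : Int))).sum :=
        (h1.map _).sum_eq

lemma combinations_mem_sublist (xs : List Int) (r : Nat) (c : List Int)
    (h : c ∈ PySem.List.combinations xs r) : c.Sublist xs :=
  (PySem.List.mem_combinations_iff xs r c).1 h |>.1

lemma combinations_nodup (xs : List Int) (hx : xs.Nodup) :
    ∀ r, (PySem.List.combinations xs r).Nodup := by
  induction xs with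
  | nil =>
    intro r
    cases r with
    | zero => rw [PySem.List.combinations_zero]; simp
    | succ r => rw [PySem.List.combinations_nil_succ]; simp
  | cons x t IH =>
    intro r
    cases r with
    | zero => rw [PySem.List.combinations_zero]; simp
    | succ r =>
      rw [PySem.List.combinations_cons_succ]
      have hxt : x ∉ t := (List.nodup_cons.mp hx).1
      have hnd : t.Nodup := (List.nodup_cons.mp hx).2
      apply List.Nodup.append
      · exact List.Nodup.map (fun a b e => by injection e) (IH hnd r)
      · exact IH hnd (r + 1)
      · intro c hc1 hc2
        rw [List.mem_map] at hc1
        obtain ⟨c', _, rfl⟩ := hc1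
        have hsub := combinations_mem_sublist t (r + 1) _ hc2
        have : x ∈ t := hsub.subset (by simp)
        exact hxt this

lemma getD_foldl_insert_fun (g : List Int → Int) (l : List (List Int))
    (d0 : PySem.Dict (List Int) Int) (x : List Int) :
    ((l.foldl (fun d c => d.insert c (g c)) d0).getD x 0) =
      if x ∈ l then g x else d0.getD x 0 := by
  induction l generalizing d0 with
  | nil => simp
  | cons c t IH =>
    rw [List.foldl_cons, IH]
    by_cases hx : x ∈ t
    · rw [if_pos hx, if_pos (by simp [hx])]
    · rw [if_neg hx, PySem.Dict.getD_insert]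
      by_cases hxc : x = c
      · subst hxc; rw [if_pos rfl, if_pos (by simp)]
      · rw [if_neg hxc, if_neg (by simp [hxc, hx])]

def mstep (f : List Int → Int) : Option (List Int) → List Int → Option (List Int)
  | none, x => some x
  | some m, x => if f m < f x then some x else some m

lemma max?_eq_mfold (l : List (List Int)) (k : List Int → Int) :
    PySem.List.max? l k = l.foldl (mstep k) none := by
  unfold PySem.List.max?
  apply PySem.List.foldl_congr_mem
  intro acc x _
  cases acc <;> rfl

lemma mfold_congr (k1 k2 : List Int → Int) (l : List (List Int))
    (h : ∀ x ∈ l, k1 x = k2 x) :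
    ∀ acc : Option (List Int), (∀ m, acc = some m → k1 m = k2 m) →
      l.foldl (mstep k1) acc = l.foldl (mstep k2) acc := by
  induction l with
  | nil => intro acc _; simp
  | cons x t IH =>
    intro acc hacc
    rw [List.foldl_cons, List.foldl_cons]
    have hx : k1 x = k2 x := h x (by simp)
    have ht : ∀ y ∈ t, k1 y = k2 y := fun y hy => h y (by simp [hy])
    cases acc with
    | none =>
      show t.foldl (mstep k1) (some x) = t.foldl (mstep k2) (some x)
      exact IH ht (some x) (fun m hm => by injection hm with hm; rw [← hm]; exact hx)
    | some m =>
      have hm : k1 m = k2 m := hacc m rfl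
      show t.foldl (mstep k1) (if k1 m < k1 x then some x else some m)
          = t.foldl (mstep k2) (if k2 m < k2 x then some x else some m)
      rw [hm, hx]
      by_cases hc : k2 m < k2 x
      · rw [if_pos hc]
        exact IH ht (some x) (fun m' hm' => by injection hm' with hm'; rw [← hm']; exact hx)
      · rw [if_neg hc]
        exact IH ht (some m) (fun m' hm' => by injection hm' with hm'; rw [← hm']; exact hm)

lemma max?_congr (l : List (List Int)) (k1 k2 : List Int → Int)
    (h : ∀ x ∈ l, k1 x = k2 x) : PySem.List.max? l k1 = PySem.List.max? l k2 := by
  rw [max?_eq_mfold, max?_eq_mfold]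
  exact mfold_congr k1 k2 l h none (fun m hm => by cases hm)

lemma mfold_isSome (f : List Int → Int) (t : List (List Int)) :
    ∀ m, ∃ m', t.foldl (mstep f) (some m) = some m' := by
  induction t with
  | nil => intro m; exact ⟨m, rfl⟩
  | cons x t IH =>
    intro m
    rw [List.foldl_cons]
    show ∃ m', t.foldl (mstep f) (if f m < f x then some x else some m) = some m'
    by_cases hc : f m < f x
    · rw [if_pos hc]; exact IH x
    · rw [if_neg hc]; exact IH m

lemma sel_aux (f : List Int → Int) (t : List (List Int)) :
    ∀ m m', t.foldl (mstep f) (some m) = some m' →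
      t.foldl (fun (st : Int × List Int) c => if f c > st.1 then (f c, c) else st) (f m, m)
        = (f m', m') := by
  induction t with
  | nil =>
    intro m m' h
    injection h with h
    rw [h]
    rfl
  | cons x t IH =>
    intro m m' h
    rw [List.foldl_cons] at h ⊢
    by_cases hc : f m < f x
    · have hb : (if f x > f m then (f x, x) else (f m, m)) = (f x, x) := if_pos hc
      have hm : mstep f (some m) x = some x := by simp [mstep, hc]
      rw [hm] at h
      rw [hb]
      exact IH x m' h
    · have hb : (if f x > f m then (f x, x) else (f m, m)) = (f m, m) := if_neg hc
      have hm : mstep f (some m) x = some m := by simp [mstep, hc]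
      rw [hm] at h
      rw [hb]
      exact IH m m' h

lemma sel_lemma (l : List (List Int)) (f : List Int → Int) (hf : ∀ x ∈ l, 0 ≤ f x) :
    (l.foldl (fun (st : Int × List Int) c => if f c > st.1 then (f c, c) else st) (-1, [])).2
      = (PySem.List.max? l f).getD [] := by
  cases l with
  | nil => rfl
  | cons x t =>
    rw [max?_eq_mfold, List.foldl_cons, List.foldl_cons]
    have h0 : (0 : Int) ≤ f x := hf x (by simp)
    have hstep : (if f x > (-1 : Int) then (f x, x) else ((-1 : Int), ([] : List Int)))
        = (f x, x) := if_pos (by omega)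
    have hm0 : mstep f none x = some x := rfl
    rw [hstep, hm0]
    obtain ⟨m', hm'⟩ := mfold_isSome f t x
    rw [hm', sel_aux f t x m' hm']
    rfl

lemma countPy_eq_refCnt (A B : List (List Int)) :
    countPy A B = refCnt (sums A) (sums B) := by
  unfold countPy
  have h := loopA_spec
    (PySem.List.sorted ((pyProduct A).map (fun comb => comb.sum)) (fun x => x) true)
    (PySem.List.sorted ((pyProduct B).map (fun comb => comb.sum)) (fun x => x) true)
    0 0 0
    (PySem.List.sorted_pairwise_rev _ (fun x => x))
    (PySem.List.sorted_pairwise_rev _ (fun x => x))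
    (Nat.zero_le _) (by omega)
  rw [List.drop_zero] at h
  rw [h, zero_add]
  exact refCnt_perm _ _ _ _
    (PySem.List.sorted_perm ((pyProduct A).map (fun comb => comb.sum)) (fun x => x) true)
    (PySem.List.sorted_perm ((pyProduct B).map (fun comb => comb.sum)) (fun x => x) true)

lemma wins_eq_refCnt (dA dB : PySem.Dict Int Int) (LA LB : List Int)
    (hA : ReprD dA LA) (hB : ReprD dB LB) : wins dA dB = refCnt LA LB := by
  obtain ⟨ndA0, memA0, cntA⟩ := hA
  obtain ⟨ndB0, memB0, cntB⟩ := hB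
  set keysA := PySem.List.sorted dA.keys (fun x => x) false with hKA
  set keysB := PySem.List.sorted dB.keys (fun x => x) false with hKB
  have permA : keysA.Perm dA.keys := PySem.List.sorted_perm dA.keys (fun x => x) false
  have permB : keysB.Perm dB.keys := PySem.List.sorted_perm dB.keys (fun x => x) false
  have ndA : keysA.Nodup := permA.nodup_iff.mpr ndA0
  have ndB : keysB.Nodup := permB.nodup_iff.mpr ndB0
  have memA : ∀ v, v ∈ keysA ↔ v ∈ LA := fun v => (permA.mem_iff).trans (memA0 v)
  have memB : ∀ v, v ∈ keysB ↔ v ∈ LB := fun v => (permB.mem_iff).trans (memB0 v)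
  have hBle : keysB.Pairwise (fun a b => a ≤ b) := PySem.List.sorted_pairwise dB.keys (fun x => x)
  have hAle : keysA.Pairwise (fun a b => a ≤ b) := PySem.List.sorted_pairwise dA.keys (fun x => x)
  have hBlt : ∀ p q (hp : p < keysB.length) (hq : q < keysB.length), p < q → keysB[p] < keysB[q] := by
    intro p q hp hq hpq
    have hle := (List.pairwise_iff_getElem.mp hBle) p q hp hq hpq
    apply lt_of_le_of_ne hle
    intro e
    have := (ndB.getElem_inj_iff).mp e
    omega
  have hfold : wins dA dB = 0 + (keysA.map (fun a => dA.getD a 0 *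
      ((keysB.filter (fun b => decide (b < a))).map (fun b => dB.getD b 0)).sum)).sum :=
    winFold_spec keysB dA dB keysA 0 0 0 hBlt hAle (Nat.zero_le _) (by simp) (by omega)
  rw [hfold, zero_add, refCnt]
  rw [group_sum keysA LA _ ndA memA]
  apply congrArg
  apply List.map_congr_left
  intro a _
  rw [← cntA a, group_countP keysB LB a ndB memB]
  apply congrArg
  apply congrArg
  apply List.map_congr_left
  intro b _
  exact cntB b

lemma core_count (A B : List (List Int)) : wins (distOf A) (distOf B) = countPy A B := by
  rw [countPy_eq_refCnt]
  exact wins_eq_refCnt _ _ _ _ (distOf_repr A) (distOf_repr B)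

lemma wins_nonneg (A B : List (List Int)) : 0 ≤ wins (distOf A) (distOf B) := by
  rw [core_count, countPy_eq_refCnt]
  exact refCnt_nonneg _ _

-- ===== VERDICT (by name: the statement is the Claim_ definition above) =====
theorem solution_spec : Claim_equal_solution := by
  intro dice _
  unfold Spec_solution solution solution_alt
  set n := dice.length with hn
  set idxs := PySem.List.pyRange 0 (n : Int) 1 with hidxs
  set combs := PySem.List.combinations idxs (n / 2) with hcombs
  have ndIdxs : idxs.Nodup := PySem.List.nodup_pyRange_one 0 (n : Int)
  have ndCombs : combs.Nodup := combinations_nodup idxs ndIdxs (n / 2)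
  set fB : List Int → Int := fun comb =>
      wins (distOf (comb.map (fun i => (PySem.List.pyGet? dice i).getD [])))
           (distOf ((idxs.filter (fun a => !(comb.contains a))).map
              (fun i => (PySem.List.pyGet? dice i).getD []))) with hfB
  set fA : List Int → Int := fun combA =>
      countPy (combA.map (fun i => (PySem.List.pyGet? dice i).getD []))
              ((idxs.filter (fun a => !(combA.contains a))).map
                (fun i => (PySem.List.pyGet? dice i).getD [])) with hfA
  have hAB : ∀ c, fA c = fB c := by
    intro c
    rw [hfA, hfB]
    exact (core_count _ _).symm
  -- the dictionary A builds has keys = combs and values fA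
  set stats0 : PySem.Dict (List Int) Int :=
    combs.foldl (fun d k => d.insert k 0) PySem.Dict.empty with hstats0
  set stats := combs.foldl (fun d combA =>
      d.insert combA (countPy (combA.map (fun i => (PySem.List.pyGet? dice i).getD []))
        (((idxs.filter (fun a => !(combA.contains a)))).map
          (fun i => (PySem.List.pyGet? dice i).getD []))) ) stats0 with hstats
  have hkeys0 : stats0.keys = PySem.Set.update ([] : List (List Int)) combs :=
    PySem.Dict.keys_foldl_insert combs (fun _ _ => (0 : Int)) PySem.Dict.empty
  have hkeys0' : stats0.keys = combs := by
    rw [hkeys0, PySem.Set.update_nil_left]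
    exact PySem.Set.ofList_eq_self_of_nodup _ ndCombs
  have hkeys : stats.keys = PySem.Set.update stats0.keys combs :=
    PySem.Dict.keys_foldl_insert combs (fun _ c => fA c) stats0
  have hkeys' : stats.keys = combs := by
    rw [hkeys, hkeys0', PySem.Set.update_eq_append_filter]
    have : (PySem.Set.ofList combs).filter (fun y => !(PySem.Set.contains combs y)) = [] := by
      rw [List.filter_eq_nil_iff]
      intro y hy
      have : y ∈ combs := (PySem.Set.mem_ofList combs y).mp hy
      simp [this]
    rw [this, List.append_nil]
  have hgetD : ∀ c ∈ combs, stats.getD c 0 = fA c := by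
    intro c hc
    have h1 : stats.getD c 0 = if c ∈ combs then fA c else stats0.getD c 0 :=
      getD_foldl_insert_fun fA combs stats0 c
    rw [h1, if_pos hc]
  -- A's selection equals B's selection
  have hmax : PySem.List.max? stats.keys (fun x => stats.getD x 0) = PySem.List.max? combs fB := by
    rw [hkeys']
    apply max?_congr
    intro c hc
    rw [hgetD c hc, hAB]
  have hsel : (combs.foldl (fun (st : Int × List Int) comb =>
        if fB comb > st.1 then (fB comb, comb) else st) (-1, [])).2
      = (PySem.List.max? combs fB).getD [] := by
    apply sel_lemma
    intro c _
    rw [hfB]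
    exact wins_nonneg _ _
  show PySem.List.sorted
      (((PySem.List.max? stats.keys (fun x => stats.getD x 0)).getD []).map (fun i => i + 1))
      (fun x => x) false
    = PySem.List.sorted
      (((combs.foldl (fun (st : Int × List Int) comb =>
          if fB comb > st.1 then (fB comb, comb) else st) (-1, [])).2).map (fun i => i + 1))
      (fun x => x) false
  rw [hmax, hsel]
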